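-- pv_equiv track=rewrite | github.com/OlaszPL/Introduction_to_computer_science_course | Kolokwia 2/zadB4_2022.py | check_table
-- ===== SOURCE A (Python) =====
-- def check_table(T, n): # dostaje tablicę wież i sprawdza czy wszystkie pola szachowane poza tymi gdzie stoją wieże
--     for r in range(n):
--         flag1, flag2 = False, False
--         for c in range(n):
--             if T[r][c]:
--                 flag1 = True
--             if T[c][r]:
--                 flag2 = True
--
--         if not flag1 or not flag2:
--             return False
--
--     return True
-- ===== SOURCE B (Python) =====
-- def check_table(T, n):
--     # One marking pass over all cells, then membership checks: a cell with a rook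
--     # marks its row index and column index; every index must end up marked.
--     rows, cols = set(), set()
--     for i in range(n):
--         for j in range(n):
--             if T[i][j]:
--                 rows.add(i)
--                 cols.add(j)
--     return all(i in rows for i in range(n)) and all(j in cols for j in range(n))
-- ===== Notes on version B (the rewrite author's own statement) =====
-- stated objective: alternative
-- what changed: A's per-index interleaved scan of row r and column r with early exit is replaced by a single marking pass over all cells into two sets of seen row/column indices, followed by membership checks.
-- outside the precondition, e.g. on check_table([[0, 0], [0]], 2): A returns False, B raises IndexError
import Mathlib
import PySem

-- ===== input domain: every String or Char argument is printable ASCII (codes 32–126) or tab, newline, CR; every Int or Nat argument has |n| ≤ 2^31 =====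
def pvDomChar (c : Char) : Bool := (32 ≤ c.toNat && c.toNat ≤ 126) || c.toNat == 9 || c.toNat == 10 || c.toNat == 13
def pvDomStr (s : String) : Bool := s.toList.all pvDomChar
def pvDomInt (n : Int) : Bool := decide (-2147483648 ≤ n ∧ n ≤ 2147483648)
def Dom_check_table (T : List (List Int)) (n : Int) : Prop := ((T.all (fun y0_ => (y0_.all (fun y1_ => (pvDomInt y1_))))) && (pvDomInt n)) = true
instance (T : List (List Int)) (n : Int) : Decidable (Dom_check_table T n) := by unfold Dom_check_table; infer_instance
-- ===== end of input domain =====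

-- B replaces A's interleaved row/column scan with early exit by one marking pass into two
-- index sets plus membership checks (objective: alternative decomposition, same cost).

-- ===== PORT A =====
-- T[i][j] as a truthiness test; total via defaults, used only where Pre_ keeps indices in range
def pvCellA (T : List (List Int)) (i j : Int) : Bool :=
  PySem.List.pyGetD (PySem.List.pyGetD T i []) j 0 != 0

def pvRowsA (T : List (List Int)) (n : Int) : List Int → Bool
  | [] => true
  | r :: rest =>
    let fl := (PySem.List.pyRange 0 n 1).foldl
      (fun fl c =>
        (if pvCellA T r c then true else fl.1,
         if pvCellA T c r then true else fl.2))
      (false, false)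
    if !fl.1 || !fl.2 then false else pvRowsA T n rest

def check_table (T : List (List Int)) (n : Int) : Bool :=
  pvRowsA T n (PySem.List.pyRange 0 n 1)

-- ===== PORT B =====
def pvCellB (T : List (List Int)) (i j : Int) : Bool :=
  PySem.List.pyGetD (PySem.List.pyGetD T i []) j 0 != 0

-- the double marking loop: row/column indices of all truthy cells
def pvMarkB (T : List (List Int)) (rng : List Int) : PySem.Set Int × PySem.Set Int :=
  rng.foldl
    (fun st i =>
      rng.foldl
        (fun st j =>
          if pvCellB T i j then (PySem.Set.add st.1 i, PySem.Set.add st.2 j) else st)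
        st)
    (PySem.Set.empty, PySem.Set.empty)

def check_table_alt (T : List (List Int)) (n : Int) : Bool :=
  let rng := PySem.List.pyRange 0 n 1
  let st := pvMarkB T rng
  rng.all (fun i => PySem.Set.contains st.1 i) && rng.all (fun j => PySem.Set.contains st.2 j)

-- ===== PRECONDITION & SPEC =====
-- Pre_ excludes inputs where Python raises IndexError (table smaller than n x n); on some
-- such malformed tables A's early exit still returns False before reaching a missing cell
-- while B's full scan raises, so all of them are excluded.
def Pre_check_table (T : List (List Int)) (n : Int) : Prop :=
  n ≤ 0 ∨ (n ≤ T.length ∧ ∀ row ∈ T.take n.toNat, n ≤ row.length)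
instance (T : List (List Int)) (n : Int) : Decidable (Pre_check_table T n) := by unfold Pre_check_table; infer_instance

def pvWitness_check_table : List (List Int) × Int := ([[1, 0], [0, 1]], 2)

def Spec_check_table (T : List (List Int)) (n : Int) (out : Bool) : Prop := out = check_table_alt T n
instance (T : List (List Int)) (n : Int) (out : Bool) : Decidable (Spec_check_table T n out) := by unfold Spec_check_table; infer_instance

-- ===== CLAIM (what is proved, stated in full; the proofs are below) =====
def Claim_equal_check_table : Prop := ∀ (T : List (List Int)) (n : Int), Dom_check_table T n → Pre_check_table T n → Spec_check_table T n (check_table T n)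

-- ===== LEMMAS AND PROOFS =====

lemma pvContains_eq (s : PySem.Set Int) (x : Int) : PySem.Set.contains s x = true ↔ x ∈ s := by
  simp [pysem]

-- A's inner loop computes the two 'some rook in row r / column r' flags
lemma pvRowsA_inner (T : List (List Int)) (r : Int) (cs : List Int) :
    ∀ fl : Bool × Bool,
      cs.foldl (fun fl c =>
        (if pvCellA T r c then true else fl.1,
         if pvCellA T c r then true else fl.2)) fl
      = (fl.1 || cs.any (fun c => pvCellA T r c), fl.2 || cs.any (fun c => pvCellA T c r)) := by
  induction cs with
  | nil => intro fl; simp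
  | cons c cs ih =>
    intro fl
    simp only [List.foldl_cons, List.any_cons, ih]
    by_cases h1 : pvCellA T r c = true <;> by_cases h2 : pvCellA T c r = true <;> simp [h1, h2]

-- A's outer loop is an 'all rows' check
lemma pvRowsA_all (T : List (List Int)) (n : Int) (rs : List Int) :
    pvRowsA T n rs
      = rs.all (fun r =>
          (PySem.List.pyRange 0 n 1).any (fun c => pvCellA T r c)
          && (PySem.List.pyRange 0 n 1).any (fun c => pvCellA T c r)) := by
  induction rs with
  | nil => rfl
  | cons r rs ih =>
    simp only [pvRowsA, pvRowsA_inner, Bool.false_or, List.all_cons, ih]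
    by_cases h1 : (PySem.List.pyRange 0 n 1).any (fun c => pvCellA T r c) = true
      <;> by_cases h2 : (PySem.List.pyRange 0 n 1).any (fun c => pvCellA T c r) = true
      <;> simp [h1, h2]

-- membership after B's inner loop (row i fixed)
lemma pvMarkB_inner (T : List (List Int)) (i : Int) (js : List Int) :
    ∀ (st : PySem.Set Int × PySem.Set Int) (x : Int),
      (x ∈ (js.foldl (fun st j =>
          if pvCellB T i j then (PySem.Set.add st.1 i, PySem.Set.add st.2 j) else st) st).1
        ↔ x ∈ st.1 ∨ (x = i ∧ ∃ j ∈ js, pvCellB T i j))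
      ∧
      (x ∈ (js.foldl (fun st j =>
          if pvCellB T i j then (PySem.Set.add st.1 i, PySem.Set.add st.2 j) else st) st).2
        ↔ x ∈ st.2 ∨ (x ∈ js ∧ pvCellB T i x)) := by
  induction js with
  | nil => intro st x; simp
  | cons j js ih =>
    intro st x
    by_cases h : pvCellB T i j = true
    · rw [List.foldl_cons, if_pos h]
      constructor
      · rw [(ih _ x).1]
        by_cases hxi : x = i
        · subst hxi; simp [pysem, h]
        · simp [pysem, h, hxi]
      · rw [(ih _ x).2]
        by_cases hxj : x = j
        · subst hxj; simp [pysem, h]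
        · simp [pysem, hxj]
    · rw [List.foldl_cons, if_neg h]
      constructor
      · rw [(ih _ x).1]
        simp [h]
      · rw [(ih _ x).2]
        by_cases hxj : x = j
        · subst hxj; simp [h]
        · simp [hxj]

-- membership after B's full marking pass
lemma pvMarkB_mem (T : List (List Int)) (rng : List Int) (x : Int) :
    (x ∈ (pvMarkB T rng).1 ↔ x ∈ rng ∧ ∃ j ∈ rng, pvCellB T x j)
    ∧ (x ∈ (pvMarkB T rng).2 ↔ x ∈ rng ∧ ∃ i ∈ rng, pvCellB T i x) := by
  unfold pvMarkB
  suffices h : ∀ (is : List Int) (st : PySem.Set Int × PySem.Set Int),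
      (x ∈ (is.foldl (fun st i => rng.foldl (fun st j =>
          if pvCellB T i j then (PySem.Set.add st.1 i, PySem.Set.add st.2 j) else st) st) st).1
        ↔ x ∈ st.1 ∨ (x ∈ is ∧ ∃ j ∈ rng, pvCellB T x j))
      ∧ (x ∈ (is.foldl (fun st i => rng.foldl (fun st j =>
          if pvCellB T i j then (PySem.Set.add st.1 i, PySem.Set.add st.2 j) else st) st) st).2
        ↔ x ∈ st.2 ∨ (x ∈ rng ∧ ∃ i ∈ is, pvCellB T i x)) by
    have := h rng (PySem.Set.empty, PySem.Set.empty)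
    simpa [PySem.Set.empty] using this
  intro is
  induction is with
  | nil => intro st; simp
  | cons i is ih =>
    intro st
    rw [List.foldl_cons]
    constructor
    · rw [(ih _).1, (pvMarkB_inner T i rng st x).1]
      by_cases hxi : x = i
      · subst hxi; simp [List.mem_cons]; tauto
      · simp [List.mem_cons, hxi]
    · rw [(ih _).2, (pvMarkB_inner T i rng st x).2]
      simp only [List.mem_cons]
      constructor
      · rintro ((h' | ⟨hx, hc⟩) | ⟨hx, i', hi', hc⟩)
        · exact Or.inl h'
        · exact Or.inr ⟨hx, i, Or.inl rfl, hc⟩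
        · exact Or.inr ⟨hx, i', Or.inr hi', hc⟩
      · rintro (h' | ⟨hx, i', rfl | hi', hc⟩)
        · exact Or.inl (Or.inl h')
        · exact Or.inl (Or.inr ⟨hx, hc⟩)
        · exact Or.inr ⟨hx, i', hi', hc⟩

-- ===== VERDICT (by name: the statement is the Claim_ definition above) =====
theorem check_table_spec : Claim_equal_check_table := by
  unfold Claim_equal_check_table
  intro T n _ _
  unfold Spec_check_table check_table check_table_alt
  rw [pvRowsA_all, Bool.eq_iff_iff]
  simp only [List.all_eq_true, Bool.and_eq_true, List.any_eq_true, pvContains_eq]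
  constructor
  · intro h
    refine ⟨fun i hi => ?_, fun j hj => ?_⟩
    · exact (pvMarkB_mem T _ i).1.mpr ⟨hi, (h i hi).1⟩
    · exact (pvMarkB_mem T _ j).2.mpr ⟨hj, (h j hj).2⟩
  · rintro ⟨h1, h2⟩ r hr
    obtain ⟨-, hE⟩ := (pvMarkB_mem T _ r).1.mp (h1 r hr)
    obtain ⟨-, hE'⟩ := (pvMarkB_mem T _ r).2.mp (h2 r hr)
    exact ⟨hE, hE'⟩
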